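-- pv_equiv track=rewrite | github.com/herolava259/Coding-Interview-Practice | HackerRankWithAlgorithm/DynamicProgramming/TravelAroundTheWolrd.py | naive_travelAroundTheWorld
-- ===== SOURCE A (Python) =====
-- def naive_travelAroundTheWorld(a,b,c):
--     if len(a) != len(b):
--         return 0
--     n = len(a)
--
--     count =0
--
--     for beg_pos in range(n):
--         current_power = 0
--         for idx in range(n):
--             current_power = min(current_power+a[(beg_pos + idx) % n], c) - b[(beg_pos+idx) % n]
--             if current_power < 0:
--                 break
--
--             if current_power >= 0 and idx == n-1:
--                 count += 1
--                 break
--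
--
--     return count
-- ===== SOURCE B (Python) =====
-- def naive_travelAroundTheWorld(a, b, c):
--     # Two-pointer skip: when a start fails after k surviving steps, every
--     # start inside the failed stretch fails too, so the scan jumps past it.
--     if len(a) != len(b):
--         return 0
--     n = len(a)
--     count = 0
--     s = 0
--     while s < n:
--         power = 0
--         k = 0
--         while k < n:
--             power = min(power + a[(s + k) % n], c) - b[(s + k) % n]
--             if power < 0:
--                 break
--             k += 1
--         if k == n:
--             count += 1
--             s += 1
--         else:
--             s += k + 1
--     return count
-- ===== Notes on version B (the rewrite author's own statement) =====
-- stated objective: alternative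
-- what changed: Replaces A's independent simulation from every start by a two-pointer skip loop: when the run from start s dies after k surviving steps, starts s+1..s+k must also die (the tank-capped step function is monotone), so the scan jumps to s+k+1 instead of retrying each of them.
import Mathlib
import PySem

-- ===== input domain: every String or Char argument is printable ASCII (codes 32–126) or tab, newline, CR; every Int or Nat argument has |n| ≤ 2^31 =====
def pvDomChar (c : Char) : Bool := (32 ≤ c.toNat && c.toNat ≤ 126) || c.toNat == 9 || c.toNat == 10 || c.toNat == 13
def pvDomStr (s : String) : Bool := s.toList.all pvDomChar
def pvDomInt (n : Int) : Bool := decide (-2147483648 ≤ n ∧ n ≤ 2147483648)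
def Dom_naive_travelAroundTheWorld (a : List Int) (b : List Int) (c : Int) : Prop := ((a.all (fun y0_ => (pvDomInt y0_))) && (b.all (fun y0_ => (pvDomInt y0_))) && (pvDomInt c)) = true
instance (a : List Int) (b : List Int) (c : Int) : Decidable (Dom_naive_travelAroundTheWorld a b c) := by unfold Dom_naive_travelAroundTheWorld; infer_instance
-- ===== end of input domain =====

-- B replaces A's restart-at-every-start scan by a two-pointer skip loop: a failed
-- stretch is jumped over, since every start inside it must fail too.

-- ===== PORT A =====
-- Inner `for idx in range(n)` loop with its two `break`s; fuel = n - idx.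
-- Indices (s+idx) % n are nonnegative and < n, so Python's % is Nat.mod and
-- a[...] / b[...] never raise; they are ported as List.getD (exact here).
def pvAInner (a b : List Int) (c : Int) (n s : Nat) : Nat → Nat → Int → Bool
  | 0, _, _ => false
  | fuel+1, idx, cp =>
    let cp' := min (cp + a.getD ((s + idx) % n) 0) c - b.getD ((s + idx) % n) 0
    if cp' < 0 then false
    else if 0 ≤ cp' ∧ idx = n - 1 then true
    else pvAInner a b c n s fuel (idx+1) cp'

def naive_travelAroundTheWorld (a : List Int) (b : List Int) (c : Int) : Int :=
  if a.length ≠ b.length then 0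
  else
    let n := a.length
    (List.range n).foldl (fun count beg => if pvAInner a b c n beg n 0 0 then count + 1 else count) 0

-- ===== PORT B =====
-- `while k < n` simulation from start s; returns the number k of surviving steps.
def pvBInner (a b : List Int) (c : Int) (n s : Nat) : Nat → Nat → Int → Nat
  | 0, k, _ => k
  | fuel+1, k, power =>
    let p := min (power + a.getD ((s + k) % n) 0) c - b.getD ((s + k) % n) 0
    if p < 0 then k else pvBInner a b c n s fuel (k+1) p

-- `while s < n` loop; s advances by at least 1 each turn, so fuel n suffices.
def pvBLoop (a b : List Int) (c : Int) (n : Nat) : Nat → Nat → Int → Int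
  | 0, _, count => count
  | fuel+1, s, count =>
    if s < n then
      let k := pvBInner a b c n s n 0 0
      if k = n then pvBLoop a b c n fuel (s+1) (count+1)
      else pvBLoop a b c n fuel (s + k + 1) count
    else count

def naive_travelAroundTheWorld_alt (a : List Int) (b : List Int) (c : Int) : Int :=
  if a.length ≠ b.length then 0
  else pvBLoop a b c a.length a.length 0 0

-- ===== PRECONDITION & SPEC =====
def Spec_naive_travelAroundTheWorld (a : List Int) (b : List Int) (c : Int) (out : Int) : Prop := out = naive_travelAroundTheWorld_alt a b c
instance (a : List Int) (b : List Int) (c : Int) (out : Int) : Decidable (Spec_naive_travelAroundTheWorld a b c out) := by unfold Spec_naive_travelAroundTheWorld; infer_instance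

-- ===== CLAIM (what is proved, stated in full; the proofs are below) =====
def Claim_equal_naive_travelAroundTheWorld : Prop := ∀ (a : List Int) (b : List Int) (c : Int), Dom_naive_travelAroundTheWorld a b c → Spec_naive_travelAroundTheWorld a b c (naive_travelAroundTheWorld a b c)

-- ===== LEMMAS AND PROOFS =====

-- Fuel value (tank power) after j steps of the run starting at position s.
def pvTraj (a b : List Int) (c : Int) (n s : Nat) : Nat → Int
  | 0 => 0
  | j+1 => min (pvTraj a b c n s j + a.getD ((s + j) % n) 0) c - b.getD ((s + j) % n) 0

-- A start s completes the tour iff the power stays ≥ 0 for all n steps.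
def pvSucc (a b : List Int) (c : Int) (n s : Nat) : Bool :=
  (List.range n).all (fun j => decide (0 ≤ pvTraj a b c n s (j+1)))

lemma pvSucc_iff (a b : List Int) (c : Int) (n s : Nat) :
    pvSucc a b c n s = true ↔ ∀ j, 0 < j → j ≤ n → 0 ≤ pvTraj a b c n s j := by
  simp only [pvSucc, List.all_eq_true, List.mem_range, decide_eq_true_eq]
  constructor
  · intro h j h1 h2
    obtain ⟨j', rfl⟩ : ∃ j', j = j' + 1 := ⟨j - 1, by omega⟩
    exact h j' (by omega)
  · intro h j hj
    exact h (j+1) (by omega) (by omega)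

-- Starting later with an empty tank never beats the earlier run (step is monotone).
lemma pvTraj_shift_le (a b : List Int) (c : Int) (n s i : Nat)
    (hi : 0 ≤ pvTraj a b c n s i) :
    ∀ j, pvTraj a b c n (s + i) j ≤ pvTraj a b c n s (i + j) := by
  intro j
  induction j with
  | zero => simpa [pvTraj] using hi
  | succ j ih =>
    show pvTraj a b c n (s+i) (j+1) ≤ pvTraj a b c n s ((i+j)+1)
    simp only [pvTraj]
    rw [Nat.add_assoc] at *
    omega

-- A's inner loop returns true iff all remaining steps stay ≥ 0.
lemma pvAInner_iff (a b : List Int) (c : Int) (n s : Nat) :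
    ∀ fuel idx, idx + fuel = n → idx < n →
      (pvAInner a b c n s fuel idx (pvTraj a b c n s idx) = true ↔
        ∀ j, idx < j → j ≤ n → 0 ≤ pvTraj a b c n s j) := by
  intro fuel
  induction fuel with
  | zero => intro idx h1 h2; omega
  | succ fuel ih =>
    intro idx h1 h2
    have hstep : min (pvTraj a b c n s idx + a.getD ((s + idx) % n) 0) c - b.getD ((s + idx) % n) 0
        = pvTraj a b c n s (idx+1) := rfl
    simp only [pvAInner, hstep]
    by_cases hneg : pvTraj a b c n s (idx+1) < 0
    · simp only [if_pos hneg]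
      constructor
      · intro h; exact absurd h (by simp)
      · intro h; exact absurd (h (idx+1) (by omega) (by omega)) (by omega)
    · simp only [if_neg hneg]
      by_cases hlast : idx = n - 1
      · have hcond : (0 ≤ pvTraj a b c n s (idx+1) ∧ idx = n - 1) := ⟨by omega, hlast⟩
        rw [if_pos (by exact_mod_cast hcond)]
        constructor
        · intro _ j hj1 hj2
          have : j = idx + 1 := by omega
          subst this; omega
        · intro _; rfl
      · have hcond : ¬ (0 ≤ pvTraj a b c n s (idx+1) ∧ idx = n - 1) := fun h => hlast h.2
        rw [if_neg (by exact_mod_cast hcond)]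
        rw [ih (idx+1) (by omega) (by omega)]
        constructor
        · intro h j hj1 hj2
          rcases Nat.lt_or_ge (idx+1) j with h' | h'
          · exact h j h' hj2
          · have : j = idx + 1 := by omega
            subst this; omega
        · intro h j hj1 hj2; exact h j (by omega) hj2

-- B's inner loop returns the number of surviving steps.
lemma pvBInner_spec (a b : List Int) (c : Int) (n s : Nat) :
    ∀ fuel k, k + fuel = n →
      k ≤ pvBInner a b c n s fuel k (pvTraj a b c n s k) ∧
      pvBInner a b c n s fuel k (pvTraj a b c n s k) ≤ n ∧
      (∀ j, k < j → j ≤ pvBInner a b c n s fuel k (pvTraj a b c n s k) → 0 ≤ pvTraj a b c n s j) ∧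
      (pvBInner a b c n s fuel k (pvTraj a b c n s k) = n ∨
        pvTraj a b c n s (pvBInner a b c n s fuel k (pvTraj a b c n s k) + 1) < 0) := by
  intro fuel
  induction fuel with
  | zero =>
    intro k hk
    simp only [pvBInner]
    exact ⟨le_refl _, by omega, by omega, Or.inl (by omega)⟩
  | succ fuel ih =>
    intro k hk
    have hstep : min (pvTraj a b c n s k + a.getD ((s + k) % n) 0) c - b.getD ((s + k) % n) 0
        = pvTraj a b c n s (k+1) := rfl
    simp only [pvBInner, hstep]
    by_cases hneg : pvTraj a b c n s (k+1) < 0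
    · simp only [if_pos hneg]
      exact ⟨le_refl _, by omega, by omega, Or.inr hneg⟩
    · simp only [if_neg hneg]
      obtain ⟨h1, h2, h3, h4⟩ := ih (k+1) (by omega)
      refine ⟨by omega, h2, ?_, h4⟩
      intro j hj1 hj2
      rcases Nat.lt_or_ge k (j-1) with h' | h'
      · exact h3 j (by omega) hj2
      · have : j = k + 1 := by omega
        subst this; omega

-- The full simulation from s: success iff it survives all n steps.
lemma pvBInner_eq_n_iff (a b : List Int) (c : Int) (n s : Nat) :
    pvBInner a b c n s n 0 0 = n ↔ pvSucc a b c n s = true := by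
  have h0 : (0 : Int) = pvTraj a b c n s 0 := rfl
  rw [h0, pvSucc_iff]
  obtain ⟨h1, h2, h3, h4⟩ := pvBInner_spec a b c n s n 0 (by omega)
  constructor
  · intro he j hj1 hj2
    exact h3 j hj1 (by omega)
  · intro h
    by_cases hKn : pvBInner a b c n s n 0 (pvTraj a b c n s 0) = n
    · exact hKn
    · exfalso
      have hKlt : pvBInner a b c n s n 0 (pvTraj a b c n s 0) < n := by omega
      rcases h4 with he | hf
      · exact hKn he
      · exact absurd (h (pvBInner a b c n s n 0 (pvTraj a b c n s 0) + 1) (by omega) (by omega))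
          (by omega)

-- Failure propagation: if the run from s dies after K < n steps, every start
-- s, s+1, …, s+K fails as well.
lemma pvSkip_fail (a b : List Int) (c : Int) (n s : Nat)
    (hK : pvBInner a b c n s n 0 0 < n) :
    ∀ i, i ≤ pvBInner a b c n s n 0 0 → pvSucc a b c n (s + i) = false := by
  have h0 : (0 : Int) = pvTraj a b c n s 0 := rfl
  rw [h0] at hK ⊢
  obtain ⟨h1, h2, h3, h4⟩ := pvBInner_spec a b c n s n 0 (by omega)
  set K := pvBInner a b c n s n 0 (pvTraj a b c n s 0) with hKdef
  have hfail : pvTraj a b c n s (K + 1) < 0 := by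
    rcases h4 with he | hf
    · omega
    · exact hf
  intro i hi
  have htr : 0 ≤ pvTraj a b c n s i := by
    rcases Nat.eq_zero_or_pos i with rfl | hpos
    · exact le_refl _
    · exact h3 i hpos hi
  obtain ⟨j, hj⟩ : ∃ j, i + j = K + 1 := ⟨K + 1 - i, by omega⟩
  have hle := pvTraj_shift_le a b c n s i htr j
  rw [hj] at hle
  have hneg : pvTraj a b c n (s + i) j < 0 := by omega
  rw [← Bool.not_eq_true, pvSucc_iff]
  intro hall
  exact absurd (hall j (by omega) (by omega)) (by omega)

-- Counting successes over [s, n).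
lemma pvCnt_skip (a b : List Int) (c : Int) (n : Nat) :
    ∀ (m s : Nat), (∀ i, i ≤ m → pvSucc a b c n (s + i) = false) →
      (List.range' s (n - s)).countP (fun t => pvSucc a b c n t)
        = (List.range' (s + m + 1) (n - (s + m + 1))).countP (fun t => pvSucc a b c n t) := by
  intro m
  induction m with
  | zero =>
    intro s hfail
    rcases Nat.lt_or_ge s n with hs | hs
    · have hr : n - s = (n - (s+1)) + 1 := by omega
      rw [hr, List.range'_succ, List.countP_cons]
      have := hfail 0 (le_refl 0)
      simp at this
      simp [this]
    · have h1 : n - s = 0 := by omega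
      have h2 : n - (s + 0 + 1) = 0 := by omega
      rw [h1, h2]
      simp
  | succ m ih =>
    intro s hfail
    have step : (List.range' s (n - s)).countP (fun t => pvSucc a b c n t)
        = (List.range' (s + 1) (n - (s + 1))).countP (fun t => pvSucc a b c n t) := by
      rcases Nat.lt_or_ge s n with hs | hs
      · have hr : n - s = (n - (s+1)) + 1 := by omega
        rw [hr, List.range'_succ, List.countP_cons]
        have := hfail 0 (by omega)
        simp at this
        simp [this]
      · have h1 : n - s = 0 := by omega
        have h2 : n - (s + 1) = 0 := by omega
        rw [h1, h2]
        simp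
    rw [step, ih (s + 1) (fun i hi => by
      have := hfail (i + 1) (by omega)
      rwa [show s + (i + 1) = s + 1 + i by omega] at this)]
    have harg : s + 1 + m + 1 = s + (m + 1) + 1 := by omega
    rw [harg]

-- B's outer loop adds the number of successful starts in [s, n) to count.
lemma pvBLoop_eq (a b : List Int) (c : Int) (n : Nat) :
    ∀ fuel s count, n ≤ s + fuel →
      pvBLoop a b c n fuel s count
        = count + ((List.range' s (n - s)).countP (fun t => pvSucc a b c n t) : Int) := by
  intro fuel
  induction fuel with
  | zero =>
    intro s count h
    have : n - s = 0 := by omega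
    simp [pvBLoop, this]
  | succ fuel ih =>
    intro s count h
    simp only [pvBLoop]
    by_cases hs : s < n
    · rw [if_pos hs]
      by_cases hk : pvBInner a b c n s n 0 0 = n
      · rw [if_pos hk, ih (s+1) (count+1) (by omega)]
        have hsucc : pvSucc a b c n s = true := (pvBInner_eq_n_iff a b c n s).mp hk
        have hr : n - s = (n - (s+1)) + 1 := by omega
        rw [hr, List.range'_succ, List.countP_cons]
        simp [hsucc]
        ring
      · rw [if_neg hk]
        have hK : pvBInner a b c n s n 0 0 < n := by
          have h2 := (pvBInner_spec a b c n s n 0 (by omega)).2.1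
          have hrfl : pvBInner a b c n s n 0 (pvTraj a b c n s 0) = pvBInner a b c n s n 0 0 := rfl
          omega
        rw [ih (s + pvBInner a b c n s n 0 0 + 1) count (by omega)]
        rw [pvCnt_skip a b c n (pvBInner a b c n s n 0 0) s
          (fun i hi => pvSkip_fail a b c n s hK i hi)]
    · rw [if_neg hs]
      have : n - s = 0 := by omega
      simp [this]

-- A's fold counts the starts whose inner loop returns true.
lemma pvFoldl_count (p : Nat → Bool) :
    ∀ (l : List Nat) (init : Int),
      l.foldl (fun cnt t => if p t then cnt + 1 else cnt) init = init + (l.countP p : Int) := by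
  intro l
  induction l with
  | nil => intro init; simp
  | cons x l ih =>
    intro init
    simp only [List.foldl_cons, List.countP_cons, ih]
    by_cases hx : p x
    · simp [hx]; ring
    · simp [hx]

-- A's inner loop agrees with pvSucc for every start in range n.
lemma pvAInner_eq_succ (a b : List Int) (c : Int) (n s : Nat) (hn : 0 < n) :
    pvAInner a b c n s n 0 0 = pvSucc a b c n s := by
  have h0 : (0 : Int) = pvTraj a b c n s 0 := rfl
  rw [Bool.eq_iff_iff, h0, pvAInner_iff a b c n s n 0 (by omega) hn, pvSucc_iff]

-- ===== VERDICT (by name: the statement is the Claim_ definition above) =====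
theorem naive_travelAroundTheWorld_spec : Claim_equal_naive_travelAroundTheWorld := by
  intro a b c _
  unfold Spec_naive_travelAroundTheWorld naive_travelAroundTheWorld naive_travelAroundTheWorld_alt
  by_cases hlen : a.length ≠ b.length
  · simp [hlen]
  · rw [if_neg hlen, if_neg hlen]
    rcases Nat.eq_zero_or_pos a.length with hn | hn
    · simp [hn, pvBLoop]
    · rw [pvBLoop_eq a b c a.length a.length 0 0 (by omega)]
      rw [pvFoldl_count]
      rw [List.range_eq_range']
      have : a.length - 0 = a.length := by omega
      rw [this]
      rw [List.countP_congr (fun t ht => ?_)]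
      rw [pvAInner_eq_succ a b c a.length t hn]
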